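-- pv_equiv track=rewrite | github.com/NickitaKhylkouski/youtube-summarizer | youtube_downloader.py | format_chapter_content
-- ===== SOURCE A (Python) =====
-- def format_chapter_content(lines):
--     """Format content for a specific chapter"""
--     if not lines:
--         return "No content found for this chapter."
--
--     # Remove timestamps and create readable paragraphs
--     text_lines = []
--     for line in lines:
--         if ']' in line:
--             text = line.split(']', 1)[1].strip()  # Remove timestamp
--             if text:
--                 text_lines.append(text)
--
--     # Group into paragraphs
--     paragraphs = []
--     current_paragraph = []
--
--     for text in text_lines:
--         current_paragraph.append(text)
--
--         # Create paragraph breaks every 4-5 sentences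
--         if len(current_paragraph) >= 4:
--             paragraph_text = ' '.join(current_paragraph)
--             paragraphs.append(paragraph_text)
--             current_paragraph = []
--
--     # Add any remaining content
--     if current_paragraph:
--         paragraph_text = ' '.join(current_paragraph)
--         paragraphs.append(paragraph_text)
--
--     return '\n\n'.join(paragraphs)
-- ===== SOURCE B (Python) =====
-- def format_chapter_content(lines):
--     """Format content for a specific chapter"""
--     if not lines:
--         return "No content found for this chapter."
--
--     # Strip timestamps: take the part after the first ']', keep non-empty strips
--     text_lines = [t for t in
--                   (line.split(']', 1)[1].strip() for line in lines if ']' in line)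
--                   if t]
--
--     # Group into paragraphs of 4 by repeatedly slicing off the first chunk
--     paragraphs = []
--     while text_lines:
--         paragraphs.append(' '.join(text_lines[:4]))
--         text_lines = text_lines[4:]
--
--     return '\n\n'.join(paragraphs)
-- ===== Notes on version B (the rewrite author's own statement) =====
-- stated objective: simpler
-- what changed: Phase 1 becomes a single comprehension and the accumulator-buffer-with-counter-and-final-flush grouping loop is replaced by repeatedly slicing off the first 4-element chunk, which absorbs the short last chunk and removes the remainder branch.
import Mathlib
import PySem

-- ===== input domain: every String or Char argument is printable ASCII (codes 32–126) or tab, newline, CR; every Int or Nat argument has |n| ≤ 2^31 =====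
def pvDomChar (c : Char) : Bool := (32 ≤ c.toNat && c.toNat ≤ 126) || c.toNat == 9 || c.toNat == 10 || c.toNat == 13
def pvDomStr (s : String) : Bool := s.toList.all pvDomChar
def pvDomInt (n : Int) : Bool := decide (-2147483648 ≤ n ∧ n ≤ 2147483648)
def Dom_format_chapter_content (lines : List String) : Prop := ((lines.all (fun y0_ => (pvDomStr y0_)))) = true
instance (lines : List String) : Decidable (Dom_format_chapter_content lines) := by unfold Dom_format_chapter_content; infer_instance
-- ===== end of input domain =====

-- B replaces A's buffer/counter/flush grouping loop by slicing off 4-element chunks (simpler decomposition, same cost).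

-- ===== PORT A =====
-- line.split(']', 1)[1].strip(): index 1 exists because ']' in line guarantees ≥ 2 parts,
-- so the .getD defaults are never taken on the guarded branch (exact there).
def pvStripAfterBracket (line : String) : String :=
  PySem.Str.strip (((PySem.Str.splitMax? line "]" 1).getD []).getD 1 "")

def format_chapter_content (lines : List String) : String :=
  if lines = [] then "No content found for this chapter."
  else
    -- for line in lines: if ']' in line: text = …; if text: text_lines.append(text)
    let text_lines : List String := lines.foldl (fun acc line =>
      if PySem.Str.isIn "]" line then
        let text := pvStripAfterBracket line
        if text ≠ "" then acc ++ [text] else acc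
      else acc) []
    -- accumulator loop: current_paragraph buffer, flushed into paragraphs at length ≥ 4
    let res : List String × List String := text_lines.foldl (fun s text =>
      let cur := s.2 ++ [text]
      if 4 ≤ cur.length then (s.1 ++ [PySem.Str.join " " cur], ([] : List String))
      else (s.1, cur)) ([], [])
    let paragraphs := if res.2 ≠ [] then res.1 ++ [PySem.Str.join " " res.2] else res.1
    PySem.Str.join "\n\n" paragraphs

-- ===== PORT B =====
-- pvChunks' termination proof (decreasing_by) cites this slice fact at the numeral bound 4
theorem pv_slice_from4 (xs : List String) : PySem.List.slice xs (some 4) none = xs.drop 4 := by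
  simpa using PySem.List.slice_from_natCast (xs := xs) (a := 4)

-- while text_lines: paragraphs.append(' '.join(text_lines[:4])); text_lines = text_lines[4:]
def pvChunks : List String → List String
  | [] => []
  | x :: rest =>
      PySem.Str.join " " (PySem.List.slice (x :: rest) none (some 4)) ::
        pvChunks (PySem.List.slice (x :: rest) (some 4) none)
  termination_by xs => xs.length
  decreasing_by simp [pv_slice_from4]

def format_chapter_content_alt (lines : List String) : String :=
  if lines = [] then "No content found for this chapter."
  else
    let text_lines : List String :=
      ((lines.filter (fun line => PySem.Str.isIn "]" line)).map pvStripAfterBracket).filter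
        (fun t => t ≠ "")
    PySem.Str.join "\n\n" (pvChunks text_lines)

-- ===== PRECONDITION & SPEC =====
def Spec_format_chapter_content (lines : List String) (out : String) : Prop := out = format_chapter_content_alt lines
instance (lines : List String) (out : String) : Decidable (Spec_format_chapter_content lines out) := by unfold Spec_format_chapter_content; infer_instance

-- ===== CLAIM (what is proved, stated in full; the proofs are below) =====
def Claim_equal_format_chapter_content : Prop := ∀ (lines : List String), Dom_format_chapter_content lines → Spec_format_chapter_content lines (format_chapter_content lines)

-- ===== LEMMAS AND PROOFS =====

theorem pv_slice_to4 (xs : List String) : PySem.List.slice xs none (some 4) = xs.take 4 := by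
  simpa using PySem.List.slice_to_natCast (xs := xs) (b := 4)

-- A's grouping loop, started with buffer c of length < 4, produces exactly the 4-chunks of c ++ xs.
theorem pv_loop_eq_chunks (xs p c : List String) (hc : c.length < 4) :
    (if (xs.foldl (fun s text =>
          if 4 ≤ (s.2 ++ [text]).length then (s.1 ++ [PySem.Str.join " " (s.2 ++ [text])], ([] : List String))
          else (s.1, s.2 ++ [text])) (p, c)).2 ≠ [] then
        (xs.foldl (fun s text =>
          if 4 ≤ (s.2 ++ [text]).length then (s.1 ++ [PySem.Str.join " " (s.2 ++ [text])], ([] : List String))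
          else (s.1, s.2 ++ [text])) (p, c)).1 ++
          [PySem.Str.join " " ((xs.foldl (fun s text =>
            if 4 ≤ (s.2 ++ [text]).length then (s.1 ++ [PySem.Str.join " " (s.2 ++ [text])], ([] : List String))
            else (s.1, s.2 ++ [text])) (p, c)).2)]
      else
        (xs.foldl (fun s text =>
          if 4 ≤ (s.2 ++ [text]).length then (s.1 ++ [PySem.Str.join " " (s.2 ++ [text])], ([] : List String))
          else (s.1, s.2 ++ [text])) (p, c)).1)
    = p ++ pvChunks (c ++ xs) := by
  induction xs generalizing p c with
  | nil =>
    simp only [List.foldl_nil]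
    match c, hc with
    | [], _ => simp [pvChunks]
    | [a], _ => simp [pvChunks, pv_slice_to4, pv_slice_from4]
    | [a,b], _ => simp [pvChunks, pv_slice_to4, pv_slice_from4]
    | [a,b,d], _ => simp [pvChunks, pv_slice_to4, pv_slice_from4]
  | cons x xs ih =>
    simp only [List.foldl_cons]
    by_cases h4 : 4 ≤ (c ++ [x]).length
    · have hc3 : c.length = 3 := by simp at h4 ⊢; omega
      match c, hc3 with
      | [a,b,d], _ =>
        have h' : (4:Nat) ≤ ([a,b,d] ++ [x]).length := by simp
        rw [if_pos h']
        rw [ih (p ++ [PySem.Str.join " " ([a,b,d] ++ [x])]) [] (by simp)]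
        simp [pvChunks, pv_slice_to4, pv_slice_from4]
    · rw [if_neg h4]
      rw [ih p (c ++ [x]) (by simp at h4 ⊢; omega)]
      simp

theorem format_chapter_content_spec : Claim_equal_format_chapter_content := by
  intro lines _
  unfold Spec_format_chapter_content format_chapter_content format_chapter_content_alt
  by_cases h : lines = []
  · simp [h]
  · rw [if_neg h, if_neg h]
    have htl : lines.foldl (fun acc line =>
        if PySem.Str.isIn "]" line then
          let text := pvStripAfterBracket line
          if text ≠ "" then acc ++ [text] else acc
        else acc) [] =
        ((lines.filter (fun line => PySem.Str.isIn "]" line)).map pvStripAfterBracket).filter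
          (fun t => t ≠ "") := by
      rw [PySem.List.foldl_if_eq_foldl_filter]
      rw [PySem.List.foldl_append_ite (p := fun t => pvStripAfterBracket t ≠ "")
        (f := pvStripAfterBracket)]
      simp [List.filter_map, Function.comp_def]
    simp only [htl]
    simpa using congrArg (PySem.Str.join "\n\n")
      (pv_loop_eq_chunks (((lines.filter (fun line => PySem.Str.isIn "]" line)).map
        pvStripAfterBracket).filter (fun t => t ≠ "")) [] [] (by simp))
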